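-- pv_equiv track=rewrite | github.com/jimbokl/LLMCORTEX | cortex/classify.py | _clamp_tripwires_to_budget
-- ===== SOURCE A (Python) =====
-- def _clamp_tripwires_to_budget(
--     tripwires: list[dict], budget: int
-- ) -> tuple[list[dict], list[dict]]:
--     """Shrink the tripwire list until its rendered size fits the budget.
--
--     Drops lowest-severity items first and never touches critical entries.
--     Returns `(kept, dropped)`. Assumes `tripwires` is already sorted by
--     severity (critical first) per classify_prompt's contract.
--     """
--     if not tripwires:
--         return [], []
--
--     def _prospective_size(trips: list[dict]) -> int:
--         # Rough per-item cost: title + body + framing. Sum of raw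
--         # content lengths is a cheap upper bound on the rendered size
--         # and avoids re-entering render_brief recursively.
--         total = 256  # framing (opener, preamble, closer, blank lines)
--         for t in trips:
--             total += len(t.get("title") or "") + len(t.get("body") or "") + 96
--         return total
--
--     kept = list(tripwires)
--     dropped: list[dict] = []
--     while kept and _prospective_size(kept) > budget:
--         # Peek the tail; stop as soon as only critical tripwires remain.
--         if (kept[-1].get("severity") or "").lower() == "critical":
--             break
--         dropped.insert(0, kept.pop())
--     return kept, dropped
-- ===== SOURCE B (Python) =====
-- def _clamp_tripwires_to_budget(
--     tripwires: list[dict], budget: int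
-- ) -> tuple[list[dict], list[dict]]:
--     """Prefix-sum re-implementation: build the cumulative rendered-size table
--     once, count how many leading items fit the budget, then scan the tail
--     downward for the last critical entry. One pass over sizes instead of
--     re-summing the list on every drop (same result, different decomposition)."""
--     prefix = [256]
--     for t in tripwires:
--         prefix.append(
--             prefix[-1] + len(t.get("title") or "") + len(t.get("body") or "") + 96
--         )
--     # max number of leading items whose cumulative size fits (sizes strictly increase)
--     k_fit = sum(1 for s in prefix[1:] if s <= budget)
--     keep = len(tripwires)
--     while keep > k_fit:
--         if (tripwires[keep - 1].get("severity") or "").lower() == "critical":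
--             break
--         keep -= 1
--     return tripwires[:keep], tripwires[keep:]
-- ===== Notes on version B (the rewrite author's own statement) =====
-- stated objective: alternative
-- what changed: Replaces A's shrink loop that re-sums the whole list's rendered size on every single drop with a one-pass prefix-sum table, a count of how many leading items fit the budget, and a single downward scan of the tail for the last critical entry.
import Mathlib
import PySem

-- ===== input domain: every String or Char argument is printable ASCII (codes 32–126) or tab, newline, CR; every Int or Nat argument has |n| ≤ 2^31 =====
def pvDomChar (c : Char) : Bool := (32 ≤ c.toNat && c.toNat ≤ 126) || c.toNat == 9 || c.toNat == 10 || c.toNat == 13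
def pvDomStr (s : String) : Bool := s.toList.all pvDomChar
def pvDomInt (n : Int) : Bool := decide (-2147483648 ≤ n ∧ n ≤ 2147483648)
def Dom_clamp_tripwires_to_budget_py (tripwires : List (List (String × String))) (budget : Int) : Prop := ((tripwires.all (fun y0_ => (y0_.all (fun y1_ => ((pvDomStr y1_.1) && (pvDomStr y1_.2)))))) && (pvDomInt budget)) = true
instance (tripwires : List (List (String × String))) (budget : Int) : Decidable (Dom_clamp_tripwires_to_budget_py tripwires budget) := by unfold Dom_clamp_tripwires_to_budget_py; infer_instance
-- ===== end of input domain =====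

-- B replaces A's re-summed-every-iteration shrink loop by a prefix-sum table, a fit count,
-- and a single downward scan of the tail for the last critical item (alternative decomposition).


-- shared by both sources verbatim: `t.get(k)` on an assoc-list dict (first match), and `(… or "")`
-- (`x or ""` on an Optional[str] is "" for both None and "", else x — so `.getD ""` is exact).
def pvGetOr (t : List (String × String)) (k : String) : String :=
  ((t.find? (fun p => p.1 == k)).map (·.2)).getD ""

-- `len(t.get("title") or "") + len(t.get("body") or "") + 96` (identical expression in A and B)
def pvCost (t : List (String × String)) : Int :=
  PySem.Str.len (pvGetOr t "title") + PySem.Str.len (pvGetOr t "body") + 96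

-- `(t.get("severity") or "").lower() == "critical"` (identical expression in A and B)
def pvIsCrit (t : List (String × String)) : Bool :=
  PySem.Str.lower (pvGetOr t "severity") == "critical"

-- ===== PORT A =====
-- _prospective_size: total = 256; for t in trips: total += len(title)+len(body)+96
def pvProspectiveSize (trips : List (List (String × String))) : Int :=
  trips.foldl (fun total t => total + pvCost t) 256

-- while kept and _prospective_size(kept) > budget: if crit(kept[-1]): break; dropped.insert(0, kept.pop())
def pvALoop (budget : Int) (kept dropped : List (List (String × String))) :
    (List (List (String × String))) × (List (List (String × String))) :=
  if h : kept ≠ [] ∧ pvProspectiveSize kept > budget then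
    if pvIsCrit (kept.getLast h.1) then (kept, dropped)
    else pvALoop budget kept.dropLast (kept.getLast h.1 :: dropped)
  else (kept, dropped)
termination_by kept.length
decreasing_by
  have := List.length_pos_of_ne_nil h.1
  simp [List.length_dropLast]; omega

def clamp_tripwires_to_budget_py (tripwires : List (List (String × String))) (budget : Int) :
    (List (List (String × String))) × (List (List (String × String))) :=
  if tripwires = [] then ([], [])
  else pvALoop budget tripwires []

-- ===== PORT B =====
-- `while keep > k_fit: if crit(tripwires[keep-1]): break; keep -= 1`
-- (keep-1 is always in range here, so plain getD transcribes Python's indexing)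
def pvBScan (tw : List (List (String × String))) (kfit : Nat) : Nat → Nat
  | 0 => 0
  | (k+1) => if k+1 > kfit then (if pvIsCrit (tw.getD k []) then k+1 else pvBScan tw kfit k) else k+1

def clamp_tripwires_to_budget_py_alt (tripwires : List (List (String × String))) (budget : Int) :
    (List (List (String × String))) × (List (List (String × String))) :=
  -- prefix = [256]; for t: prefix.append(prefix[-1] + cost t)
  let pre := tripwires.foldl (fun p t => p ++ [p.getLast! + pvCost t]) [(256 : Int)]
  -- k_fit = sum(1 for s in prefix[1:] if s <= budget)
  let kfit := (pre.drop 1).countP (fun s => s ≤ budget)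
  let keep := pvBScan tripwires kfit tripwires.length
  -- tripwires[:keep], tripwires[keep:]  (keep is a nonnegative in-range count)
  (tripwires.take keep, tripwires.drop keep)

-- ===== PRECONDITION & SPEC =====
def Spec_clamp_tripwires_to_budget_py (tripwires : List (List (String × String))) (budget : Int) (out : (List (List (String × String))) × (List (List (String × String)))) : Prop := out = clamp_tripwires_to_budget_py_alt tripwires budget
instance (tripwires : List (List (String × String))) (budget : Int) (out : (List (List (String × String))) × (List (List (String × String)))) : Decidable (Spec_clamp_tripwires_to_budget_py tripwires budget out) := by unfold Spec_clamp_tripwires_to_budget_py; infer_instance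

-- ===== CLAIM (what is proved, stated in full; the proofs are below) =====
def Claim_equal_clamp_tripwires_to_budget_py : Prop := ∀ (tripwires : List (List (String × String))) (budget : Int), Dom_clamp_tripwires_to_budget_py tripwires budget → Spec_clamp_tripwires_to_budget_py tripwires budget (clamp_tripwires_to_budget_py tripwires budget)

-- ===== LEMMAS AND PROOFS =====

-- cumulative rendered size of the first m items
def pvS (tw : List (List (String × String))) (m : Nat) : Int :=
  256 + ((tw.map pvCost).take m).sum

-- the tail of B's prefix table, as a recursive scan
def pvScan (a : Int) : List (List (String × String)) → List Int
  | [] => []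
  | t :: ts => (a + pvCost t) :: pvScan (a + pvCost t) ts

-- A's loop result as a keep-count, by downward recursion
def pvKeep (tw : List (List (String × String))) (b : Int) : Nat → Nat
  | 0 => 0
  | (m+1) => if pvS tw (m+1) ≤ b then m+1
             else if pvIsCrit (tw.getD m []) then m+1 else pvKeep tw b m

theorem pvCost_pos (t : List (String × String)) : 0 < pvCost t := by
  simp [pvCost, PySem.Str.len_eq]; positivity

theorem pvSum_nonneg (l : List (List (String × String))) : 0 ≤ (l.map pvCost).sum := by
  induction l with
  | nil => simp
  | cons t ts ih => have := pvCost_pos t; simp [List.map_cons]; omega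

theorem pvProspectiveSize_eq (l : List (List (String × String))) (a : Int) :
    l.foldl (fun total t => total + pvCost t) a = a + (l.map pvCost).sum := by
  induction l generalizing a with
  | nil => simp
  | cons t ts ih => simp [List.foldl_cons, ih, List.map_cons]; ring

theorem pvPrefix_fold (l : List (List (String × String))) (p : List Int) (hp : p ≠ []) :
    l.foldl (fun p t => p ++ [p.getLast! + pvCost t]) p = p ++ pvScan p.getLast! l := by
  induction l generalizing p with
  | nil => simp [pvScan]
  | cons t ts ih =>
      rw [List.foldl_cons, ih _ (by simp)]
      have : (p ++ [p.getLast! + pvCost t]).getLast! = p.getLast! + pvCost t := by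
        simp [List.getLast!_eq_getLast?_getD]
      rw [this]; simp [pvScan]

theorem pvScan_mem_gt (l : List (List (String × String))) (a y : Int) (h : y ∈ pvScan a l) : a < y := by
  induction l generalizing a with
  | nil => simp [pvScan] at h
  | cons t ts ih =>
      simp [pvScan] at h
      have hc := pvCost_pos t
      rcases h with h | h
      · omega
      · have := ih (a + pvCost t) h; omega

-- count facts about B's k_fit
theorem pvCount_facts (l : List (List (String × String))) (b : Int) (a : Int) (c : Nat)
    (hc : c = (pvScan a l).countP (fun s => decide (s ≤ b))) :
    c ≤ l.length ∧
    (∀ m, c < m → m ≤ l.length → b < a + ((l.map pvCost).take m).sum) ∧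
    (0 < c → a + ((l.map pvCost).take c).sum ≤ b) := by
  induction l generalizing a c with
  | nil => subst hc; simp [pvScan]; omega
  | cons t ts ih =>
      have hcp := pvCost_pos t
      by_cases hx : a + pvCost t ≤ b
      · -- first entry counted
        have hcc : c = (pvScan (a + pvCost t) ts).countP (fun s => decide (s ≤ b)) + 1 := by
          simp [hc, pvScan, hx]
        obtain ⟨ih1, ih2, ih3⟩ := ih (a + pvCost t) _ rfl
        refine ⟨by simp [hcc]; omega, ?_, ?_⟩
        · intro m hm hml
          obtain ⟨m', rfl⟩ : ∃ m', m = m' + 1 := ⟨m - 1, by omega⟩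
          have := ih2 m' (by omega) (by simpa using hml)
          simp only [List.map_cons, List.take_succ_cons, List.sum_cons]
          omega
        · intro _
          rcases Nat.eq_zero_or_pos ((pvScan (a + pvCost t) ts).countP (fun s => decide (s ≤ b))) with h0 | h0
          · simp [hcc, h0]; omega
          · have := ih3 h0
            simp only [hcc, List.map_cons, List.take_succ_cons, List.sum_cons]
            omega
      · -- first entry > b, and every later entry is even bigger
        have hcc : c = 0 := by
          rw [hc]
          simp only [pvScan, List.countP_cons]
          have h2 : (pvScan (a + pvCost t) ts).countP (fun s => decide (s ≤ b)) = 0 := by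
            rw [List.countP_eq_zero]
            intro y hy
            have := pvScan_mem_gt ts (a + pvCost t) y hy
            simp; omega
          simp [h2, hx]
        refine ⟨by omega, ?_, by omega⟩
        intro m hm hml
        obtain ⟨m', rfl⟩ : ∃ m', m = m' + 1 := ⟨m - 1, by omega⟩
        have hnn : 0 ≤ ((ts.map pvCost).take m').sum := by
          rw [← List.map_take]; exact pvSum_nonneg _
        simp only [List.map_cons, List.take_succ_cons, List.sum_cons]
        omega

-- A's loop computes (take (pvKeep m), drop (pvKeep m)) from state (take m, drop m)
theorem pvALoop_eq (tw : List (List (String × String))) (b : Int) :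
    ∀ m, m ≤ tw.length →
      pvALoop b (tw.take m) (tw.drop m) =
        (tw.take (pvKeep tw b m), tw.drop (pvKeep tw b m)) := by
  intro m
  induction m with
  | zero => intro _; rw [pvALoop]; simp [pvKeep]
  | succ m ih =>
      intro hm
      have hmlt : m < tw.length := by omega
      have hne : tw.take (m+1) ≠ [] := by
        simp [← List.length_pos_iff]; omega
      have hsize : pvProspectiveSize (tw.take (m+1)) = pvS tw (m+1) := by
        simp [pvProspectiveSize, pvS, pvProspectiveSize_eq]
      have hlast : (tw.take (m+1)).getLast hne = tw.getD m [] := by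
        rw [List.getLast_eq_getElem]
        simp [List.length_take, Nat.min_eq_left (by omega : m+1 ≤ tw.length),
              List.getElem_take, List.getD_eq_getElem?_getD, List.getElem?_eq_getElem hmlt]
      have hkeq : pvKeep tw b (m+1) =
          if pvS tw (m+1) ≤ b then m+1
          else if pvIsCrit (tw.getD m []) then m+1 else pvKeep tw b m := rfl
      rw [pvALoop]
      by_cases hle : pvS tw (m+1) ≤ b
      · rw [dif_neg (by rw [hsize]; omega)]
        rw [hkeq, if_pos hle]
      · rw [dif_pos ⟨hne, by rw [hsize]; omega⟩]
        rw [hkeq, if_neg hle, hlast]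
        by_cases hcrit : pvIsCrit (tw.getD m []) = true
        · rw [if_pos hcrit, if_pos hcrit]
        · rw [if_neg hcrit, if_neg hcrit]
          have hdl : (tw.take (m+1)).dropLast = tw.take m := by
            apply List.ext_getElem
            · simp; omega
            · intro i h1 h2
              simp [List.getElem_dropLast, List.getElem_take]
          have hdrop : tw.getD m [] :: tw.drop (m+1) = tw.drop m := by
            rw [List.drop_eq_getElem_cons hmlt,
                List.getD_eq_getElem?_getD, List.getElem?_eq_getElem hmlt]
            rfl
          rw [hdl, hdrop]
          exact ih (by omega)

-- pvKeep agrees with B's downward scan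
theorem pvKeep_eq_bscan (tw : List (List (String × String))) (b : Int) (c : Nat)
    (hC2 : ∀ m, c < m → m ≤ tw.length → b < pvS tw m)
    (hC3 : 0 < c → pvS tw c ≤ b) :
    ∀ m, c ≤ m → m ≤ tw.length → pvKeep tw b m = pvBScan tw c m := by
  intro m
  induction m with
  | zero => intro _ _; simp [pvKeep, pvBScan]
  | succ m ih =>
      intro hcm hml
      by_cases hc : c = m + 1
      · subst hc
        have := hC3 (by omega)
        simp [pvKeep, pvBScan, this]
      · have h1 : c ≤ m := by omega
        have h2 := hC2 (m+1) (by omega) hml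
        simp only [pvKeep, pvBScan, if_neg (by omega : ¬ pvS tw (m+1) ≤ b),
                   if_pos (by omega : m + 1 > c)]
        by_cases hcrit : pvIsCrit (tw[m]?.getD []) = true
        · simp [hcrit]
        · simp only [Bool.not_eq_true] at hcrit
          simp [hcrit, ih h1 (by omega)]

-- ===== VERDICT (by name: the statement is the Claim_ definition above) =====
theorem clamp_tripwires_to_budget_py_spec : Claim_equal_clamp_tripwires_to_budget_py := by
  intro tw b _
  unfold Spec_clamp_tripwires_to_budget_py
  unfold clamp_tripwires_to_budget_py clamp_tripwires_to_budget_py_alt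
  dsimp only
  have hpre : tw.foldl (fun p t => p ++ [p.getLast! + pvCost t]) [(256 : Int)] =
      [(256 : Int)] ++ pvScan 256 tw := by
    simpa using pvPrefix_fold tw [(256:Int)] (by simp)
  rw [hpre]
  have hdrop1 : (([(256 : Int)] ++ pvScan 256 tw).drop 1) = pvScan 256 tw := rfl
  rw [hdrop1]
  set c := (pvScan 256 tw).countP (fun s => decide (s ≤ b)) with hc
  obtain ⟨hc1, hc2, hc3⟩ := pvCount_facts tw b 256 c hc
  by_cases hnil : tw = []
  · subst hnil; simp [pvBScan]
  · rw [if_neg hnil]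
    have h1 : pvALoop b tw [] = pvALoop b (tw.take tw.length) (tw.drop tw.length) := by
      rw [List.take_length, List.drop_length]
    rw [h1, pvALoop_eq tw b tw.length le_rfl]
    have h2 : pvKeep tw b tw.length = pvBScan tw c tw.length :=
      pvKeep_eq_bscan tw b c (fun m hm hml => hc2 m hm hml) (fun h => hc3 h) tw.length hc1 le_rfl
    rw [h2]
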